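-- pv_equiv track=rewrite | github.com/hifrickenfive/StanfordAI | CS244N/a4/scratch.py | count_common_bigrams
-- ===== SOURCE A (Python) =====
-- def count_bigrams(sentence):
--     words = sentence.split()
--     bigrams = {}
--     for w1, w2 in zip(words, words[1:]):
--         bigram = f"{w1} {w2}"
--         if bigram in bigrams:
--             bigrams[bigram] += 1
--         else:
--             bigrams[bigram] = 1
--     return bigrams
--
-- def count_common_bigrams(sentence1, sentence2):
--     bigrams1 = count_bigrams(sentence1)
--     bigrams2 = count_bigrams(sentence2)
--     bigram_count = 0
--     common_bigram = list()
--     for bigram, count in bigrams1.items():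
--         if bigram in bigrams2:
--             bigram_count += count
--             common_bigram.append(bigram)
--     return bigram_count, common_bigram
-- ===== SOURCE B (Python) =====
-- def count_common_bigrams(sentence1, sentence2):
--     words2 = sentence2.split()
--     bigrams2 = set(f"{w1} {w2}" for w1, w2 in zip(words2, words2[1:]))
--     words1 = sentence1.split()
--     bigram_count = 0
--     common_bigram = []
--     seen = set()
--     for w1, w2 in zip(words1, words1[1:]):
--         bigram = f"{w1} {w2}"
--         if bigram in bigrams2:
--             bigram_count += 1
--             if bigram not in seen:
--                 seen.add(bigram)
--                 common_bigram.append(bigram)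
--     return bigram_count, common_bigram
-- ===== Notes on version B (the rewrite author's own statement) =====
-- stated objective: alternative
-- what changed: Instead of building frequency dicts for both sentences and then iterating sentence1's dict items, B builds only a membership set of sentence2's bigrams and counts matches in a single streaming pass over sentence1's word pairs, tracking first appearances with a seen set.
import Mathlib
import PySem

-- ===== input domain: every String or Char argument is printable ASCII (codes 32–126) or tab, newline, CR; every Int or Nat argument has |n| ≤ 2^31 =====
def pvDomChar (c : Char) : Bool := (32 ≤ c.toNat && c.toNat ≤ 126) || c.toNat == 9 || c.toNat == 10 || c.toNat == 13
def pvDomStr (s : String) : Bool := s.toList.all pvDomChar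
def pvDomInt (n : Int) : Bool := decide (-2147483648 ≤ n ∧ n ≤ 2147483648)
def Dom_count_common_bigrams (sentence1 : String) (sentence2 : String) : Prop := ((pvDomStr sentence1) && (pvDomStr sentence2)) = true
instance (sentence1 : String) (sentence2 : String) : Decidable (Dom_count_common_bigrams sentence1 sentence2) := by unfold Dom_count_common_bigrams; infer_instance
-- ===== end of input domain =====

-- B replaces A's two frequency dicts and second pass over dict items by a membership set of
-- sentence2's bigrams plus one streaming pass over sentence1's word pairs (alternative decomposition).

-- f"{w1} {w2}" (both programs form the bigram string the same way)
def pvBigram (w1 w2 : String) : String := w1 ++ " " ++ w2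

-- A's loop body: if bigram in bigrams: bigrams[bigram] += 1 else: bigrams[bigram] = 1
def pvCountStep (bigrams : PySem.Dict String Int) (p : String × String) : PySem.Dict String Int :=
  let bigram := pvBigram p.1 p.2
  if bigrams.contains bigram then
    bigrams.insert bigram (bigrams.getD bigram 0 + 1)
  else
    bigrams.insert bigram 1

-- ===== PORT A =====
def count_bigrams (sentence : String) : PySem.Dict String Int :=
  let words := PySem.Str.split₀ sentence
  (words.zip (PySem.List.slice words (some 1) none)).foldl pvCountStep PySem.Dict.empty

def count_common_bigrams (sentence1 : String) (sentence2 : String) : Int × List String :=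
  let bigrams1 := count_bigrams sentence1
  let bigrams2 := count_bigrams sentence2
  bigrams1.items.foldl
    (fun acc kv =>
      if bigrams2.contains kv.1 then (acc.1 + kv.2, acc.2 ++ [kv.1]) else acc)
    (0, [])

-- ===== PORT B =====
def count_common_bigrams_alt (sentence1 : String) (sentence2 : String) : Int × List String :=
  let words2 := PySem.Str.split₀ sentence2
  let bigrams2 : PySem.Set String :=
    PySem.Set.ofList ((words2.zip (PySem.List.slice words2 (some 1) none)).map (fun p => pvBigram p.1 p.2))
  let words1 := PySem.Str.split₀ sentence1
  let st :=
    (words1.zip (PySem.List.slice words1 (some 1) none)).foldl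
      (fun (st : (Int × List String) × PySem.Set String) p =>
        let bigram := pvBigram p.1 p.2
        if bigrams2.contains bigram then
          ((st.1.1 + 1,
            if st.2.contains bigram then st.1.2 else st.1.2 ++ [bigram]),
           st.2.add bigram)
        else st)
      ((0, []), PySem.Set.empty)
  st.1

-- ===== PRECONDITION & SPEC =====
def Spec_count_common_bigrams (sentence1 : String) (sentence2 : String) (out : Int × List String) : Prop := out = count_common_bigrams_alt sentence1 sentence2
instance (sentence1 : String) (sentence2 : String) (out : Int × List String) : Decidable (Spec_count_common_bigrams sentence1 sentence2 out) := by unfold Spec_count_common_bigrams; infer_instance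

-- ===== CLAIM (what is proved, stated in full; the proofs are below) =====
def Claim_equal_count_common_bigrams : Prop := ∀ (sentence1 : String) (sentence2 : String), Dom_count_common_bigrams sentence1 sentence2 → Spec_count_common_bigrams sentence1 sentence2 (count_common_bigrams sentence1 sentence2)

-- ===== LEMMAS AND PROOFS =====

-- the list of bigram strings of a sentence (proof-side view shared by both arguments)
def pvBigrams (s : String) : List String :=
  ((PySem.Str.split₀ s).zip (PySem.List.slice (PySem.Str.split₀ s) (some 1) none)).map
    (fun p => pvBigram p.1 p.2)

-- A's hand-rolled counting dict IS Counter(bigrams)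
lemma count_bigrams_eq_counter (s : String) :
    count_bigrams s = PySem.Dict.counter (pvBigrams s) := by
  have hstep : pvCountStep = fun (d : PySem.Dict String Int) (p : String × String) =>
      d.insert (pvBigram p.1 p.2) (d.getD (pvBigram p.1 p.2) 0 + 1) := by
    funext d p
    unfold pvCountStep
    by_cases h : d.contains (pvBigram p.1 p.2)
    · simp [h]
    · simp [h, PySem.Dict.getD_of_not_contains d 0 (by simpa using h)]
  simp only [count_bigrams, pvBigrams, hstep,
    ← PySem.Dict.foldl_insert_getD_add_one_eq_counter, List.foldl_map]

-- A's second pass, computed: sum of the kept counts, keys kept in order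
lemma foldA (q : String → Bool) (f : String → Int) (ks : List String) (a : Int) (l : List String) :
    (ks.map (fun k => (k, f k))).foldl
      (fun acc kv => if q kv.1 then (acc.1 + kv.2, acc.2 ++ [kv.1]) else acc) (a, l)
    = (a + ((ks.filter q).map f).sum, l ++ ks.filter q) := by
  induction ks generalizing a l with
  | nil => simp
  | cons k ks ih =>
    by_cases h : q k
    · simp [h, ih, add_assoc]
    · simp [h, ih]

-- B's streaming pass, computed (invariant: seen = common as lists)
lemma foldB (q : String → Bool) (bgs : List String) (t : Int) (c : List String) :
    bgs.foldl
      (fun (st : (Int × List String) × PySem.Set String) bg =>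
        if q bg then
          ((st.1.1 + 1, if PySem.Set.contains st.2 bg then st.1.2 else st.1.2 ++ [bg]),
           PySem.Set.add st.2 bg)
        else st)
      ((t, c), c)
    = ((t + ((bgs.filter q).length : Int), PySem.Set.update c (bgs.filter q)),
       PySem.Set.update c (bgs.filter q)) := by
  induction bgs generalizing t c with
  | nil => simp [PySem.Set.update]
  | cons bg bgs ih =>
    by_cases h : q bg
    · simp only [List.foldl_cons]
      rw [if_pos h,
          show (if PySem.Set.contains c bg then c else c ++ [bg]) = PySem.Set.add c bg from rfl,
          ih (t + 1) (PySem.Set.add c bg),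
          List.filter_cons_of_pos h, PySem.Set.update_cons]
      simp only [Prod.mk.injEq, List.length_cons, and_true]
      push_cast; ring
    · simp only [List.foldl_cons]
      rw [if_neg h, ih t c, List.filter_cons_of_neg h]

-- first-occurrence dedup commutes with filter
lemma ofList_filter (q : String → Bool) (xs : List String) :
    PySem.Set.ofList (xs.filter q) = (PySem.Set.ofList xs).filter q := by
  induction xs using List.reverseRecOn with
  | nil => simp
  | append_singleton xs x ih =>
    rw [List.filter_append]
    by_cases h : q x
    · simp only [h, List.filter_cons, List.filter_nil, if_pos]
      rw [PySem.Set.ofList_append_singleton, PySem.Set.ofList_append_singleton, ih]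
      by_cases hc : x ∈ xs
      · simp [PySem.Set.add, hc, h]
      · simp [PySem.Set.add, hc, h, List.filter_append]
    · simp only [h, List.filter_cons, List.filter_nil, if_neg, Bool.not_eq_true, List.append_nil]
      rw [PySem.Set.ofList_append_singleton, ih]
      by_cases hc : x ∈ xs
      · simp [PySem.Set.add, hc]
      · simp [PySem.Set.add, hc, h, List.filter_append]

-- B's pass stated over the word pairs themselves (foldB pushed through the map)
lemma foldB_pairs (S2 : PySem.Set String) (ps : List (String × String)) (t : Int) (c : List String) :
    ps.foldl
      (fun (st : (Int × List String) × PySem.Set String) p =>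
        if S2.contains (pvBigram p.1 p.2) = true then
          ((st.1.1 + 1,
            if st.2.contains (pvBigram p.1 p.2) = true then st.1.2 else st.1.2 ++ [pvBigram p.1 p.2]),
           st.2.add (pvBigram p.1 p.2))
        else st)
      ((t, c), c)
    = ((t + (((ps.map (fun p => pvBigram p.1 p.2)).filter (fun bg => S2.contains bg)).length : Int),
        PySem.Set.update c ((ps.map (fun p => pvBigram p.1 p.2)).filter (fun bg => S2.contains bg))),
       PySem.Set.update c ((ps.map (fun p => pvBigram p.1 p.2)).filter (fun bg => S2.contains bg))) := by
  have h := foldB (fun bg => S2.contains bg) (ps.map (fun p => pvBigram p.1 p.2)) t c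
  rw [List.foldl_map] at h
  exact h

-- a Nodup list of keys covering ys: the counts sum to the length
lemma sum_count (ks ys : List String) (hnd : ks.Nodup) (hsub : ∀ y ∈ ys, y ∈ ks) :
    (ks.map (fun k => (List.count k ys : Int))).sum = (ys.length : Int) := by
  induction ks generalizing ys with
  | nil =>
    cases ys with
    | nil => simp
    | cons y ys => exact absurd (hsub y (by simp)) (by simp)
  | cons k ks ih =>
    rw [List.nodup_cons] at hnd
    have hmap : ks.map (fun k' => (List.count k' ys : Int))
        = ks.map (fun k' => (List.count k' (ys.filter (fun y => y ≠ k)) : Int)) :=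
      List.map_congr_left (fun k' hk' => by
        have hne : k' ≠ k := fun he => hnd.1 (he ▸ hk')
        show (List.count k' ys : Int) = (List.count k' (ys.filter (fun y => y ≠ k)) : Int)
        rw [List.count_filter (by simp [hne])])
    have hsub' : ∀ y ∈ ys.filter (fun y => y ≠ k), y ∈ ks := by
      intro y hy
      rw [List.mem_filter] at hy
      rcases (List.mem_cons.mp (hsub y hy.1)) with he | hm
      · exact absurd he (by simpa using hy.2)
      · exact hm
    rw [List.map_cons, List.sum_cons, hmap, ih (ys.filter (fun y => y ≠ k)) hnd.2 hsub']
    have hlen : ys.length = List.count k ys + (ys.filter (fun y => y ≠ k)).length := by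
      rw [List.length_eq_countP_add_countP (fun y => y == k), List.count_eq_countP]
      congr 1
      rw [← List.countP_eq_length_filter]
      exact List.countP_congr (by intro a _; simp)
    rw [hlen]; push_cast; ring

-- ===== VERDICT (by name: the statement is the Claim_ definition above) =====
theorem count_common_bigrams_spec : Claim_equal_count_common_bigrams := by
  intro s1 s2 _
  unfold Spec_count_common_bigrams
  show count_common_bigrams s1 s2 = count_common_bigrams_alt s1 s2
  set q : String → Bool := fun bg => PySem.Set.contains (PySem.Set.ofList (pvBigrams s2)) bg with hq
  have hcontains : ∀ bg, (count_bigrams s2).contains bg = q bg := by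
    intro bg
    rw [count_bigrams_eq_counter, PySem.Dict.contains_counter, hq,
        Bool.eq_iff_iff, PySem.Set.contains_iff, PySem.Set.mem_ofList]
    simp
  have hA : count_common_bigrams s1 s2
      = (0 + (((PySem.Set.ofList (pvBigrams s1)).filter q).map
            (fun k => (List.count k (pvBigrams s1) : Int))).sum,
         [] ++ (PySem.Set.ofList (pvBigrams s1)).filter q) := by
    simp only [count_common_bigrams]
    rw [count_bigrams_eq_counter s1, PySem.Dict.items_counter]
    rw [show (fun (acc : Int × List String) (kv : String × Int) =>
          if (count_bigrams s2).contains kv.1 = true then (acc.1 + kv.2, acc.2 ++ [kv.1]) else acc)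
        = (fun acc kv => if q kv.1 = true then (acc.1 + kv.2, acc.2 ++ [kv.1]) else acc) from by
          funext acc kv; rw [hcontains kv.1]]
    exact foldA q (fun k => (List.count k (pvBigrams s1) : Int)) (PySem.Set.ofList (pvBigrams s1)) 0 []
  have halt : count_common_bigrams_alt s1 s2
      = (((PySem.Str.split₀ s1).zip (PySem.List.slice (PySem.Str.split₀ s1) (some 1) none)).foldl
          (fun (st : (Int × List String) × PySem.Set String) p =>
            if (PySem.Set.ofList (pvBigrams s2)).contains (pvBigram p.1 p.2) = true then
              ((st.1.1 + 1,
                if st.2.contains (pvBigram p.1 p.2) = true then st.1.2 else st.1.2 ++ [pvBigram p.1 p.2]),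
               st.2.add (pvBigram p.1 p.2))
            else st) ((0, []), ([] : List String))).1 := rfl
  have hB : count_common_bigrams_alt s1 s2
      = (0 + (((pvBigrams s1).filter q).length : Int),
         PySem.Set.update ([] : List String) ((pvBigrams s1).filter q)) := by
    rw [halt, foldB_pairs (PySem.Set.ofList (pvBigrams s2))
          ((PySem.Str.split₀ s1).zip (PySem.List.slice (PySem.Str.split₀ s1) (some 1) none)) 0 []]
    rfl
  rw [hA, hB]
  refine Prod.ext ?_ ?_
  · show 0 + (((PySem.Set.ofList (pvBigrams s1)).filter q).map
        (fun k => (List.count k (pvBigrams s1) : Int))).sum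
      = 0 + (((pvBigrams s1).filter q).length : Int)
    congr 1
    have hmapc : ((PySem.Set.ofList (pvBigrams s1)).filter q).map
          (fun k => (List.count k (pvBigrams s1) : Int))
        = ((PySem.Set.ofList (pvBigrams s1)).filter q).map
          (fun k => (List.count k ((pvBigrams s1).filter q) : Int)) :=
      List.map_congr_left (fun k hk => by
        show (List.count k (pvBigrams s1) : Int) = (List.count k ((pvBigrams s1).filter q) : Int)
        rw [List.count_filter (List.mem_filter.mp hk).2])
    rw [hmapc]
    refine sum_count _ _ (List.Nodup.filter q (PySem.Set.nodup_ofList _)) ?_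
    intro y hy
    rw [List.mem_filter] at hy ⊢
    exact ⟨(PySem.Set.mem_ofList _ _).mpr hy.1, hy.2⟩
  · show ([] : List String) ++ (PySem.Set.ofList (pvBigrams s1)).filter q
      = PySem.Set.update [] ((pvBigrams s1).filter q)
    rw [List.nil_append, PySem.Set.update_nil_left, ofList_filter]
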